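-- pv_equiv track=rewrite | github.com/Alexander-Benesch/Gitea-Agent | samuel/slices/implementation/context_builder.py | _resolve_expansion_scope
-- ===== SOURCE A (Python) =====
-- from typing import Any
--
-- def _path_matches_module(pattern: str, file_path: str) -> bool:
--     if pattern.endswith("/"):
--         return file_path.startswith(pattern)
--     return file_path == pattern or file_path.startswith(pattern + "/")
--
-- def _resolve_expansion_scope(
--     files: list[str], modules: list[dict], policy: dict,
-- ) -> dict[str, Any]:
--     allowed: set[str] = set()
--     blocked: set[str] = set()
--     roles: set[str] = set()
--     for f in files:
--         for mod in modules:
--             mod_path = mod.get("path", "")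
--             if mod_path and _path_matches_module(mod_path, f):
--                 roles.add(mod.get("role", ""))
--     for role in roles:
--         p = policy.get(role, {})
--         allowed.update(p.get("allowed_scopes", []))
--         blocked.update(p.get("blocked_scopes", []))
--     return {"allowed": allowed, "blocked": blocked, "roles": roles}
-- ===== SOURCE B (Python) =====
-- def _resolve_expansion_scope(files, modules, policy):
--     # Index module paths once, then look up each file's O(len) candidate prefixes.
--     index = {}
--     for i, mod in enumerate(modules):
--         p = mod.get("path", "")
--         if p:
--             index.setdefault(p, []).append(i)
--     seen = set()
--     role_list = []
--     for f in files:
--         # A nonempty pattern matches f iff it is f itself, or f[:i] / f[:i+1]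
--         # for some i with f[i] == "/".
--         cands = {f}
--         for i, ch in enumerate(f):
--             if ch == "/":
--                 cands.add(f[:i])
--                 cands.add(f[:i + 1])
--         hits = []
--         for c in cands:
--             hits += index.get(c, [])
--         for i in sorted(hits):
--             r = modules[i].get("role", "")
--             if r not in seen:
--                 seen.add(r)
--                 role_list.append(r)
--     allowed = set()
--     blocked = set()
--     for role in role_list:
--         p = policy.get(role, {})
--         allowed.update(p.get("allowed_scopes", []))
--         blocked.update(p.get("blocked_scopes", []))
--     return {"allowed": allowed, "blocked": blocked, "roles": set(role_list)}
-- ===== Notes on version B (the rewrite author's own statement) =====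
-- stated objective: faster
-- what changed: Instead of testing every (file, module) pair with a prefix-match predicate, B indexes module paths in a dict once and, for each file, looks up only the file's O(len) candidate prefix strings (f, f[:i] and f[:i+1] at each '/'), sorting the hit indices to keep A's module-order role insertion.
import Mathlib
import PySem

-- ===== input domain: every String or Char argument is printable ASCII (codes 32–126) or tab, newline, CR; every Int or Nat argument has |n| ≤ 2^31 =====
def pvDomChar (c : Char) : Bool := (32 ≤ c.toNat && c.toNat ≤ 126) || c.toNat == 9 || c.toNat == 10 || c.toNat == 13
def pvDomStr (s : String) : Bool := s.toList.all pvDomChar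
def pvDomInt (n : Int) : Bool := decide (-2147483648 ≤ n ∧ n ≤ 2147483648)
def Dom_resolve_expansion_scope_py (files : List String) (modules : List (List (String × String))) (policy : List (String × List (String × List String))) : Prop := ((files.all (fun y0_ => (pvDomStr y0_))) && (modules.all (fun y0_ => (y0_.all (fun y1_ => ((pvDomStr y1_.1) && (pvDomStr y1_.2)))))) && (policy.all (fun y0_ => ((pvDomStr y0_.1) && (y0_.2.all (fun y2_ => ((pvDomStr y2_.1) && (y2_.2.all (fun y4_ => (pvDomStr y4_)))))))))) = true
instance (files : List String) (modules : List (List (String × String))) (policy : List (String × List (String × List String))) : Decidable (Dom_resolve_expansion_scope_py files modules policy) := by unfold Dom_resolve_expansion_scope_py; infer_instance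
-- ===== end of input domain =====

-- B replaces A's all-pairs prefix matching by a dict of module paths looked up at each file's
-- candidate prefixes (objective: faster; a timing run measured the speed-up).


-- ===== PORT A =====
-- helper _path_matches_module; `pattern + "/"` is ported as String.ofList (pattern.toList ++ ['/']) (Python str concat, exact)
def pathMatchesModulePy (pattern : String) (file_path : String) : Bool :=
  if PySem.Str.endswith pattern "/" then
    PySem.Str.startswith file_path pattern
  else
    file_path == pattern || PySem.Str.startswith file_path (String.ofList (pattern.toList ++ ['/']))

-- the nested files × modules loop that builds the `roles` set
def pvRolesA (files : List String) (modules : List (List (String × String))) : PySem.Set String :=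
  files.foldl (fun roles f =>
    modules.foldl (fun roles m =>
      let mod_path := PySem.Dict.getD (PySem.Dict.mk m) "path" ""
      if mod_path != "" && pathMatchesModulePy mod_path f then
        PySem.Set.add roles (PySem.Dict.getD (PySem.Dict.mk m) "role" "")
      else roles) roles) PySem.Set.empty

-- `for role in roles:` iterates a Python set; allowed/blocked are sets built from unions, so the
-- result does not depend on that iteration order — ported in the set's insertion order.
def pvScopesA (policy : List (String × List (String × List String))) (roles : List String) : PySem.Set String × PySem.Set String :=
  roles.foldl (fun ab role =>
    let p := PySem.Dict.getD (PySem.Dict.mk policy) role []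
    (PySem.Set.update ab.1 (PySem.Dict.getD (PySem.Dict.mk p) "allowed_scopes" []),
     PySem.Set.update ab.2 (PySem.Dict.getD (PySem.Dict.mk p) "blocked_scopes" [])))
    (PySem.Set.empty, PySem.Set.empty)

def resolve_expansion_scope_py (files : List String) (modules : List (List (String × String))) (policy : List (String × List (String × List String))) : List (String × List String) :=
  let roles := pvRolesA files modules
  let ab := pvScopesA policy roles
  [("allowed", ab.1), ("blocked", ab.2), ("roles", roles)]

-- ===== PORT B =====
-- B-side helpers: the pieces of Source B's function, named so the proofs can speak about them.
-- index = {}; for i, mod in enumerate(modules): p = mod.get("path",""); if p: index.setdefault(p, []).append(i)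
def pvIndexB (modules : List (List (String × String))) : PySem.Dict String (List Int) :=
  (PySem.List.enumerate modules).foldl (fun d im =>
    let p := PySem.Dict.getD (PySem.Dict.mk im.2) "path" ""
    if p != "" then d.modify p [] (fun l => l ++ [im.1]) else d) PySem.Dict.empty

-- cands = {f}; for i, ch in enumerate(f): if ch == "/": cands.add(f[:i]); cands.add(f[:i+1])
def pvCandsB (f : String) : PySem.Set String :=
  (PySem.List.enumerate f.toList).foldl (fun cs ic =>
    if ic.2 == '/' then
      PySem.Set.add (PySem.Set.add cs (String.ofList (PySem.List.slice f.toList none (some ic.1))))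
        (String.ofList (PySem.List.slice f.toList none (some (ic.1 + 1))))
    else cs) (PySem.Set.ofList [f])

-- per-file body: gather hits from the index buckets of the candidates, then walk sorted(hits)
-- keeping (seen, role_list); `for c in cands:` iterates a Python set but hits is sorted right
-- after and the hit indices are pairwise distinct, so the result is iteration-order independent.
def pvFileStepB (modules : List (List (String × String))) (index : PySem.Dict String (List Int)) (st : PySem.Set String × List String) (f : String) : PySem.Set String × List String :=
  let hits : List Int := (pvCandsB f).foldl (fun acc c => acc ++ PySem.Dict.getD index c []) []
  (PySem.List.sorted hits (fun x => x)).foldl (fun st i =>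
    let r := PySem.Dict.getD (PySem.Dict.mk (PySem.List.pyGetD modules i [])) "role" ""
    if PySem.Set.contains st.1 r then st else (PySem.Set.add st.1 r, st.2 ++ [r])) st

-- final loop of Source B (same loop as in A, over the deterministic role_list)
def pvScopesB (policy : List (String × List (String × List String))) (role_list : List String) : PySem.Set String × PySem.Set String :=
  role_list.foldl (fun ab role =>
    let p := PySem.Dict.getD (PySem.Dict.mk policy) role []
    (PySem.Set.update ab.1 (PySem.Dict.getD (PySem.Dict.mk p) "allowed_scopes" []),
     PySem.Set.update ab.2 (PySem.Dict.getD (PySem.Dict.mk p) "blocked_scopes" [])))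
    (PySem.Set.empty, PySem.Set.empty)

def resolve_expansion_scope_py_alt (files : List String) (modules : List (List (String × String))) (policy : List (String × List (String × List String))) : List (String × List String) :=
  let st := files.foldl (pvFileStepB modules (pvIndexB modules)) (PySem.Set.empty, [])
  let ab := pvScopesB policy st.2
  [("allowed", ab.1), ("blocked", ab.2), ("roles", PySem.Set.ofList st.2)]

-- ===== PRECONDITION & SPEC =====
def Spec_resolve_expansion_scope_py (files : List String) (modules : List (List (String × String))) (policy : List (String × List (String × List String))) (out : List (String × List String)) : Prop := out = resolve_expansion_scope_py_alt files modules policy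
instance (files : List String) (modules : List (List (String × String))) (policy : List (String × List (String × List String))) (out : List (String × List String)) : Decidable (Spec_resolve_expansion_scope_py files modules policy out) := by unfold Spec_resolve_expansion_scope_py; infer_instance

-- ===== CLAIM (what is proved, stated in full; the proofs are below) =====
def Claim_equal_resolve_expansion_scope_py : Prop := ∀ (files : List String) (modules : List (List (String × String))) (policy : List (String × List (String × List String))), Dom_resolve_expansion_scope_py files modules policy → Spec_resolve_expansion_scope_py files modules policy (resolve_expansion_scope_py files modules policy)

-- ===== LEMMAS AND PROOFS =====

-- abbreviations for module fields
def pvPat (m : List (String × String)) : String := PySem.Dict.getD (PySem.Dict.mk m) "path" ""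
def pvRole (m : List (String × String)) : String := PySem.Dict.getD (PySem.Dict.mk m) "role" ""
def pvMatch (f : String) (m : List (String × String)) : Bool := (pvPat m != "") && pathMatchesModulePy (pvPat m) f
-- the roles contributed by one file, in module order
def pvRoleSeq (f : String) (modules : List (List (String × String))) : List String :=
  (modules.filter (pvMatch f)).map pvRole
-- the matching module indices of one file, ascending, as Python ints
def pvIdx (f : String) (modules : List (List (String × String))) : List Int :=
  ((List.range modules.length).filter (fun i => pvMatch f (modules.getD i []))).map (fun (i : Nat) => (i : Int))
-- the index bucket of a key c, as a filtered enumeration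
def pvBucket (modules : List (List (String × String))) (c : String) : List Int :=
  ((PySem.List.enumerate modules).filter (fun im => (pvPat im.2 == c) && (pvPat im.2 != ""))).map (fun im => im.1)
-- the hits of one file, before sorting
def pvHits (f : String) (modules : List (List (String × String))) : List Int :=
  (pvCandsB f).foldl (fun acc c => acc ++ PySem.Dict.getD (pvIndexB modules) c []) []

-- basic String ↔ List Char glue
lemma str_eq_ofList_iff (Q : String) (l : List Char) : Q = String.ofList l ↔ Q.toList = l := by
  constructor
  · intro h
    rw [h, String.toList_ofList]
  · intro h
    rw [← h, String.ofList_toList]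

lemma toList_ne_nil_of_ne_empty (P : String) (hP : P ≠ "") : P.toList ≠ [] := by
  intro h
  apply hP
  have h2 := (str_eq_ofList_iff P []).2 h
  simpa using h2

-- membership in an enumeration
lemma mem_enumerate {α : Type} (xs : List α) (im : Int × α) :
    im ∈ PySem.List.enumerate xs ↔ ∃ i, ∃ h : i < xs.length, im = ((i : Int), xs[i]) := by
  constructor
  · intro h
    obtain ⟨k, hk, he⟩ := List.mem_iff_getElem.1 h
    have hk' : k < xs.length := by simpa [PySem.List.length_enumerate] using hk
    refine ⟨k, hk', ?_⟩
    rw [← he, PySem.List.getElem_enumerate]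
    simp
  · rintro ⟨i, h, rfl⟩
    refine List.mem_iff_getElem.2 ⟨i, by simpa [PySem.List.length_enumerate] using h, ?_⟩
    rw [PySem.List.getElem_enumerate]
    simp

-- A's inner loop over modules is the fold of Set.add over pvRoleSeq
lemma pvRolesA_inner (f : String) (modules : List (List (String × String))) (S : PySem.Set String) :
    modules.foldl (fun roles m =>
      let mod_path := PySem.Dict.getD (PySem.Dict.mk m) "path" ""
      if mod_path != "" && pathMatchesModulePy mod_path f then
        PySem.Set.add roles (PySem.Dict.getD (PySem.Dict.mk m) "role" "")
      else roles) S = (pvRoleSeq f modules).foldl PySem.Set.add S := by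
  have h1 : modules.foldl (fun roles m =>
      let mod_path := PySem.Dict.getD (PySem.Dict.mk m) "path" ""
      if mod_path != "" && pathMatchesModulePy mod_path f then
        PySem.Set.add roles (PySem.Dict.getD (PySem.Dict.mk m) "role" "")
      else roles) S
      = (modules.filter (pvMatch f)).foldl (fun roles m => PySem.Set.add roles (pvRole m)) S :=
    PySem.List.foldl_if_eq_foldl_filter (pvMatch f)
      (fun roles m => PySem.Set.add roles (pvRole m)) modules S
  have h2 : (pvRoleSeq f modules).foldl PySem.Set.add S
      = (modules.filter (pvMatch f)).foldl (fun roles m => PySem.Set.add roles (pvRole m)) S :=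
    List.foldl_map (f := pvRole) (g := PySem.Set.add)
  rw [h1, h2]

-- the index bucket of a key c
lemma pvIndexB_getD (modules : List (List (String × String))) (c : String) :
    PySem.Dict.getD (pvIndexB modules) c [] = pvBucket modules c := by
  have h1 : pvIndexB modules
      = ((PySem.List.enumerate modules).filter (fun im => pvPat im.2 != "")).foldl
          (fun d im => PySem.Dict.modify d (pvPat im.2) [] (fun l => l ++ [im.1])) PySem.Dict.empty :=
    PySem.List.foldl_if_eq_foldl_filter
      (fun (im : Int × List (String × String)) => pvPat im.2 != "")
      (fun (d : PySem.Dict String (List Int)) (im : Int × List (String × String)) =>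
        PySem.Dict.modify d (pvPat im.2) [] (fun l => l ++ [im.1]))
      (PySem.List.enumerate modules) PySem.Dict.empty
  have h2 : ((PySem.List.enumerate modules).filter (fun im => pvPat im.2 != "")).foldl
        (fun d im => PySem.Dict.modify d (pvPat im.2) [] (fun l => l ++ [im.1])) PySem.Dict.empty
      = (((PySem.List.enumerate modules).filter (fun im => pvPat im.2 != "")).map
          (fun im => (pvPat im.2, im.1))).foldl
          (fun d pr => PySem.Dict.modify d pr.1 [] (fun l => l ++ [pr.2])) PySem.Dict.empty :=
    (List.foldl_map (f := fun (im : Int × List (String × String)) => (pvPat im.2, im.1))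
      (g := fun (d : PySem.Dict String (List Int)) (pr : String × Int) =>
        PySem.Dict.modify d pr.1 [] (fun l => l ++ [pr.2]))).symm
  rw [h1, h2, PySem.Dict.getD_foldl_modify_append, List.filter_map, List.map_map]
  unfold pvBucket
  simp only [PySem.Dict.getD_empty, List.nil_append, Function.comp_def, List.filter_filter]

lemma nodup_pvBucket (modules : List (List (String × String))) (c : String) :
    (pvBucket modules c).Nodup := by
  unfold pvBucket
  have h1 : ((PySem.List.enumerate modules).map (fun im => im.1)).Nodup := by
    rw [PySem.List.map_fst_enumerate]
    exact PySem.List.nodup_pyRange_one 0 _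
  exact ((List.filter_sublist).map _).nodup h1

lemma mem_pvBucket (modules : List (List (String × String))) (c : String) (x : Int) :
    x ∈ pvBucket modules c ↔
      ∃ i, ∃ h : i < modules.length, x = (i : Int) ∧ pvPat modules[i] ≠ "" ∧ pvPat modules[i] = c := by
  unfold pvBucket
  simp only [List.mem_map, List.mem_filter]
  constructor
  · rintro ⟨im, ⟨hmem, hcond⟩, rfl⟩
    obtain ⟨i, hi, rfl⟩ := (mem_enumerate _ _).1 hmem
    rw [Bool.and_eq_true] at hcond
    refine ⟨i, hi, rfl, ?_, ?_⟩
    · simpa [bne_iff_ne] using hcond.2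
    · simpa using hcond.1
  · rintro ⟨i, hi, rfl, hne, hc⟩
    refine ⟨((i : Int), modules[i]), ⟨(mem_enumerate _ _).2 ⟨i, hi, rfl⟩, ?_⟩, rfl⟩
    have hcne : c ≠ "" := hc ▸ hne
    simp [hc, bne_iff_ne, hcne]

-- generic membership of the candidate fold
lemma cand_fold_mem (f : String) (l : List (Int × Char)) (acc : PySem.Set String) (y : String) :
    y ∈ l.foldl (fun cs ic =>
        if ic.2 == '/' then
          PySem.Set.add (PySem.Set.add cs (String.ofList (PySem.List.slice f.toList none (some ic.1))))
            (String.ofList (PySem.List.slice f.toList none (some (ic.1 + 1))))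
        else cs) acc
    ↔ y ∈ acc ∨ ∃ ic ∈ l, ic.2 = '/' ∧
        (y = String.ofList (PySem.List.slice f.toList none (some ic.1)) ∨
         y = String.ofList (PySem.List.slice f.toList none (some (ic.1 + 1)))) := by
  induction l generalizing acc with
  | nil => simp
  | cons ic l ih =>
    simp only [List.foldl_cons]
    by_cases h : ic.2 = '/'
    · rw [if_pos (by simpa using h)]
      rw [ih]
      simp only [PySem.Set.mem_add, List.mem_cons]
      constructor
      · rintro (((hy | hy) | hy) | ⟨jc, hjc, hsl, hy⟩)
        · exact Or.inl hy
        · exact Or.inr ⟨ic, Or.inl rfl, h, Or.inl hy⟩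
        · exact Or.inr ⟨ic, Or.inl rfl, h, Or.inr hy⟩
        · exact Or.inr ⟨jc, Or.inr hjc, hsl, hy⟩
      · rintro (hy | ⟨jc, (rfl | hjc), hsl, hy⟩)
        · exact Or.inl (Or.inl (Or.inl hy))
        · rcases hy with hy | hy
          · exact Or.inl (Or.inl (Or.inr hy))
          · exact Or.inl (Or.inr hy)
        · exact Or.inr ⟨jc, hjc, hsl, hy⟩
    · rw [if_neg (by simpa using h)]
      rw [ih]
      simp only [List.mem_cons]
      constructor
      · rintro (hy | ⟨jc, hjc, hsl, hy⟩)
        · exact Or.inl hy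
        · exact Or.inr ⟨jc, Or.inr hjc, hsl, hy⟩
      · rintro (hy | ⟨jc, (rfl | hjc), hsl, hy⟩)
        · exact Or.inl hy
        · exact absurd hsl h
        · exact Or.inr ⟨jc, hjc, hsl, hy⟩

-- membership in the candidate set
lemma mem_pvCandsB (f : String) (y : String) :
    y ∈ pvCandsB f ↔ y = f ∨ ∃ i, ∃ h : i < f.toList.length, f.toList[i] = '/' ∧
      (y = String.ofList (f.toList.take i) ∨ y = String.ofList (f.toList.take (i + 1))) := by
  unfold pvCandsB
  rw [cand_fold_mem]
  constructor
  · rintro (hy | ⟨ic, hic, hsl, hy⟩)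
    · left
      have h2 := (PySem.Set.mem_ofList [f] y).1 hy
      simpa using h2
    · right
      obtain ⟨i, hi, rfl⟩ := (mem_enumerate _ _).1 hic
      refine ⟨i, hi, hsl, ?_⟩
      rcases hy with hy | hy
      · left
        rw [hy, PySem.List.slice_to_natCast]
      · right
        rw [hy]
        rw [show ((i : Int) + 1) = ((i + 1 : Nat) : Int) by push_cast; ring]
        rw [PySem.List.slice_to_natCast]
  · rintro (rfl | ⟨i, hi, hsl, hy⟩)
    · left
      exact (PySem.Set.mem_ofList [y] y).2 (by simp)
    · right
      refine ⟨((i : Int), f.toList[i]), (mem_enumerate _ _).2 ⟨i, hi, rfl⟩, hsl, ?_⟩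
      rcases hy with hy | hy
      · left
        rw [hy, PySem.List.slice_to_natCast]
      · right
        rw [hy]
        rw [show ((i : Int) + 1) = ((i + 1 : Nat) : Int) by push_cast; ring]
        rw [PySem.List.slice_to_natCast]

-- candidate sets stay duplicate-free
lemma cand_fold_nodup (f : String) (l : List (Int × Char)) (acc : PySem.Set String) (h : acc.Nodup) :
    (l.foldl (fun cs ic =>
        if ic.2 == '/' then
          PySem.Set.add (PySem.Set.add cs (String.ofList (PySem.List.slice f.toList none (some ic.1))))
            (String.ofList (PySem.List.slice f.toList none (some (ic.1 + 1))))
        else cs) acc).Nodup := by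
  induction l generalizing acc with
  | nil => exact h
  | cons ic l ih =>
    simp only [List.foldl_cons]
    by_cases hc : ic.2 = '/'
    · rw [if_pos (by simpa using hc)]
      exact ih _ (PySem.Set.nodup_add _ _ (PySem.Set.nodup_add _ _ h))
    · rw [if_neg (by simpa using hc)]
      exact ih _ h

lemma nodup_pvCandsB (f : String) : (pvCandsB f).Nodup := by
  unfold pvCandsB
  exact cand_fold_nodup f _ _ (PySem.Set.nodup_ofList [f])

-- the key characterisation: a nonempty pattern matches f iff it is one of f's candidates
lemma match_iff_cand (P f : String) (hP : P ≠ "") :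
    pathMatchesModulePy P f = true ↔ (P = f ∨ ∃ i, ∃ h : i < f.toList.length, f.toList[i] = '/' ∧
      (P = String.ofList (f.toList.take i) ∨ P = String.ofList (f.toList.take (i + 1)))) := by
  have hpne : P.toList ≠ [] := toList_ne_nil_of_ne_empty P hP
  have hslash : ("/" : String).toList = ['/'] := by decide
  constructor
  · intro hm
    unfold pathMatchesModulePy at hm
    by_cases he : PySem.Str.endswith P "/" = true
    · rw [if_pos he] at hm
      have hpre : P.toList <+: f.toList := by
        rw [PySem.Str.startswith_eq] at hm
        exact (PySem.Chars.startswith_iff _ _).1 hm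
      obtain ⟨t, ht⟩ : ∃ t, t ++ ['/'] = P.toList := by
        rw [PySem.Str.endswith_eq, hslash] at he
        exact (PySem.Chars.endswith_iff _ _).1 he
      have htake : P.toList = f.toList.take P.toList.length := List.prefix_iff_eq_take.1 hpre
      have hlen : P.toList.length ≤ f.toList.length := hpre.length_le
      have hlt' : P.toList.length = t.length + 1 := by
        have h6 := congrArg List.length ht
        simpa using h6.symm
      have hi : t.length < f.toList.length := by omega
      right
      have htk : t ++ ['/'] = f.toList.take (t.length + 1) := by
        have h0 := htake
        rw [← ht] at h0
        simpa using h0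
      have hsl : f.toList[t.length]'hi = '/' := by
        have h4 := List.getElem_of_eq htk (by simp : t.length < (t ++ ['/']).length)
        rw [List.getElem_take] at h4
        simpa using h4.symm
      refine ⟨t.length, hi, hsl, Or.inr ?_⟩
      rw [str_eq_ofList_iff, ← ht]
      exact htk
    · rw [if_neg he] at hm
      rw [Bool.or_eq_true] at hm
      rcases hm with hfe | hsw
      · left
        exact (beq_iff_eq.1 hfe).symm
      · right
        have hpre : P.toList ++ ['/'] <+: f.toList := by
          rw [PySem.Str.startswith_eq] at hsw
          have h5 := (PySem.Chars.startswith_iff _ _).1 hsw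
          simpa [String.toList_ofList] using h5
        have hlen := hpre.length_le
        have hi : P.toList.length < f.toList.length := by
          simp only [List.length_append, List.length_cons, List.length_nil] at hlen
          omega
        have htk : P.toList ++ ['/'] = f.toList.take (P.toList.length + 1) := by
          have h5 := List.prefix_iff_eq_take.1 hpre
          simpa using h5
        have hgl : f.toList[P.toList.length]'hi = '/' := by
          have h4 := List.getElem_of_eq htk (by simp : P.toList.length < (P.toList ++ ['/']).length)
          rw [List.getElem_take] at h4
          simpa using h4.symm
        refine ⟨P.toList.length, hi, hgl, Or.inl ?_⟩
        rw [str_eq_ofList_iff]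
        have hsucc : f.toList.take (P.toList.length + 1)
            = f.toList.take P.toList.length ++ [f.toList[P.toList.length]'hi] :=
          List.take_succ_eq_append_getElem hi
        rw [hsucc] at htk
        exact (List.append_inj' htk (by simp)).1
  · intro hcand
    unfold pathMatchesModulePy
    by_cases he : PySem.Str.endswith P "/" = true
    · rw [if_pos he]
      rw [PySem.Str.startswith_eq]
      apply (PySem.Chars.startswith_iff _ _).2
      rcases hcand with rfl | ⟨i, hi, hsl, hy | hy⟩
      · exact List.prefix_refl _
      · rw [(str_eq_ofList_iff _ _).1 hy]
        exact List.take_prefix _ _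
      · rw [(str_eq_ofList_iff _ _).1 hy]
        exact List.take_prefix _ _
    · rw [if_neg he]
      rw [Bool.or_eq_true]
      rcases hcand with rfl | ⟨i, hi, hsl, hy | hy⟩
      · left
        exact beq_iff_eq.2 rfl
      · right
        rw [PySem.Str.startswith_eq]
        apply (PySem.Chars.startswith_iff _ _).2
        have hp : P.toList = f.toList.take i := (str_eq_ofList_iff _ _).1 hy
        have hsucc : f.toList.take (i + 1) = f.toList.take i ++ [f.toList[i]'hi] :=
          List.take_succ_eq_append_getElem hi
        have hq : P.toList ++ ['/'] = f.toList.take (i + 1) := by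
          rw [hsucc, hp, hsl]
        rw [String.toList_ofList, hq]
        exact List.take_prefix _ _
      · exfalso
        apply he
        rw [PySem.Str.endswith_eq, hslash]
        apply (PySem.Chars.endswith_iff _ _).2
        have hp : P.toList = f.toList.take (i + 1) := (str_eq_ofList_iff _ _).1 hy
        have hsucc : f.toList.take (i + 1) = f.toList.take i ++ [f.toList[i]'hi] :=
          List.take_succ_eq_append_getElem hi
        exact ⟨f.toList.take i, by rw [hp, hsucc, hsl]⟩

-- membership in the matching-index list
lemma mem_pvIdx (f : String) (modules : List (List (String × String))) (x : Int) :
    x ∈ pvIdx f modules ↔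
      ∃ i, ∃ h : i < modules.length, x = (i : Int) ∧ pvMatch f modules[i] = true := by
  unfold pvIdx
  constructor
  · intro hx
    obtain ⟨i, hif, rfl⟩ := List.mem_map.1 hx
    obtain ⟨hir, hq⟩ := List.mem_filter.1 hif
    have hi : i < modules.length := List.mem_range.1 hir
    refine ⟨i, hi, rfl, ?_⟩
    rwa [List.getD_eq_getElem _ _ hi] at hq
  · rintro ⟨i, hi, rfl, hq⟩
    refine List.mem_map.2 ⟨i, List.mem_filter.2 ⟨List.mem_range.2 hi, ?_⟩, rfl⟩
    rwa [List.getD_eq_getElem _ _ hi]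

lemma mem_pvHits (f : String) (modules : List (List (String × String))) (x : Int) :
    x ∈ pvHits f modules ↔ x ∈ pvIdx f modules := by
  unfold pvHits
  rw [PySem.List.foldl_append_eq_flatMap]
  simp only [List.nil_append, List.mem_flatMap]
  rw [mem_pvIdx]
  constructor
  · rintro ⟨c, hc, hx⟩
    rw [pvIndexB_getD] at hx
    obtain ⟨i, hi, rfl, hne, hpc⟩ := (mem_pvBucket _ _ _).1 hx
    refine ⟨i, hi, rfl, ?_⟩
    unfold pvMatch
    rw [Bool.and_eq_true, bne_iff_ne]
    refine ⟨hne, ?_⟩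
    apply (match_iff_cand _ f hne).2
    have hmem : pvPat modules[i] ∈ pvCandsB f := by rw [hpc]; exact hc
    exact (mem_pvCandsB f _).1 hmem
  · rintro ⟨i, hi, rfl, hm⟩
    unfold pvMatch at hm
    rw [Bool.and_eq_true, bne_iff_ne] at hm
    obtain ⟨hne, hmatch⟩ := hm
    have hcand : pvPat modules[i] ∈ pvCandsB f :=
      (mem_pvCandsB f _).2 ((match_iff_cand _ f hne).1 hmatch)
    refine ⟨pvPat modules[i], hcand, ?_⟩
    rw [pvIndexB_getD]
    exact (mem_pvBucket _ _ _).2 ⟨i, hi, rfl, hne, rfl⟩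

-- an element of a bucket determines its key
lemma bucket_key (modules : List (List (String × String))) (c c' : String) (x : Int)
    (h : x ∈ pvBucket modules c) (h' : x ∈ pvBucket modules c') : c = c' := by
  obtain ⟨i, hi, rfl, _, hc⟩ := (mem_pvBucket _ _ _).1 h
  obtain ⟨i', hi', hx, _, hc'⟩ := (mem_pvBucket _ _ _).1 h'
  have hii : i = i' := by exact_mod_cast hx
  subst hii
  rw [← hc, ← hc']

lemma nodup_flatMap_buckets (modules : List (List (String × String))) :
    ∀ (cs : List String), cs.Nodup →
      (cs.flatMap (fun c => PySem.Dict.getD (pvIndexB modules) c [])).Nodup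
  | [], _ => by simp
  | c :: cs, h => by
    rw [List.flatMap_cons]
    apply List.Nodup.append
    · rw [pvIndexB_getD]
      exact nodup_pvBucket modules c
    · exact nodup_flatMap_buckets modules cs (List.nodup_cons.1 h).2
    · intro x hx hx'
      obtain ⟨c', hc', hxc'⟩ := List.mem_flatMap.1 hx'
      rw [pvIndexB_getD] at hx hxc'
      have hcc : c = c' := bucket_key modules c c' x hx hxc'
      exact (List.nodup_cons.1 h).1 (by rw [hcc]; exact hc')

lemma nodup_pvHits (f : String) (modules : List (List (String × String))) :
    (pvHits f modules).Nodup := by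
  unfold pvHits
  rw [PySem.List.foldl_append_eq_flatMap]
  simp only [List.nil_append]
  exact nodup_flatMap_buckets modules (pvCandsB f) (nodup_pvCandsB f)

lemma pairwise_pvIdx (f : String) (modules : List (List (String × String))) :
    (pvIdx f modules).Pairwise (· < ·) := by
  unfold pvIdx
  apply List.pairwise_map.2
  refine List.Pairwise.imp ?_ (List.Pairwise.sublist List.filter_sublist List.pairwise_lt_range)
  intro a b h
  exact_mod_cast h

lemma sorted_pvHits (f : String) (modules : List (List (String × String))) :
    PySem.List.sorted (pvHits f modules) (fun x => x) = pvIdx f modules := by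
  apply PySem.List.sorted_eq_of_perm_of_pairwise_lt
  · refine (List.perm_ext_iff_of_nodup ?_ (nodup_pvHits f modules)).2
      (fun a => (mem_pvHits f modules a).symm)
    exact (pairwise_pvIdx f modules).imp (fun h => ne_of_lt h)
  · exact pairwise_pvIdx f modules

-- the (seen, role_list) pair walk equals the plain Set.add fold on both components
lemma pair_fold (rs : List String) (S : PySem.Set String) :
    rs.foldl (fun st r => if PySem.Set.contains st.1 r then st else (PySem.Set.add st.1 r, st.2 ++ [r])) (S, S)
      = (rs.foldl PySem.Set.add S, rs.foldl PySem.Set.add S) := by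
  induction rs generalizing S with
  | nil => rfl
  | cons r rs ih =>
    show rs.foldl (fun st r => if PySem.Set.contains st.1 r then st else (PySem.Set.add st.1 r, st.2 ++ [r]))
        (if PySem.Set.contains S r then (S, S) else (PySem.Set.add S r, S ++ [r]))
      = (rs.foldl PySem.Set.add (PySem.Set.add S r), rs.foldl PySem.Set.add (PySem.Set.add S r))
    by_cases h : r ∈ S
    · rw [if_pos ((PySem.Set.contains_iff S r).2 h), PySem.Set.add_of_mem h]
      exact ih S
    · rw [if_neg (fun hc => h ((PySem.Set.contains_iff S r).1 hc)),
        show S ++ [r] = PySem.Set.add S r from (PySem.Set.add_of_not_mem h).symm]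
      exact ih (PySem.Set.add S r)

-- reading a list through filtered indices
lemma filter_range_map_getD {α β : Type} (l : List α) (p : α → Bool) (g : α → β) (d : α) :
    ((List.range l.length).filter (fun i => p (l.getD i d))).map (fun i => g (l.getD i d))
      = (l.filter p).map g := by
  induction l with
  | nil => simp
  | cons x l ih =>
    rw [List.length_cons, List.range_succ_eq_map]
    simp only [List.filter_cons, List.getD_cons_zero, List.filter_map, Function.comp_def,
      List.getD_cons_succ]
    cases hp : p x with
    | true =>
      rw [if_pos rfl, if_pos rfl]
      simp only [List.map_cons, List.getD_cons_zero, List.map_map, Function.comp_def,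
        List.getD_cons_succ]
      rw [ih]
    | false =>
      rw [if_neg (by simp), if_neg (by simp)]
      simp only [List.map_map, Function.comp_def, List.getD_cons_succ]
      rw [ih]

lemma pvIdx_map_role (f : String) (modules : List (List (String × String))) :
    (pvIdx f modules).map (fun i => pvRole (PySem.List.pyGetD modules i [])) = pvRoleSeq f modules := by
  unfold pvIdx pvRoleSeq
  simp only [List.map_map, Function.comp_def, PySem.List.pyGetD_natCast]
  exact filter_range_map_getD modules (pvMatch f) pvRole []

-- one file step of B, started on a doubled state, is A's per-file role fold on both components
lemma file_step (modules : List (List (String × String))) (f : String) (S : PySem.Set String) :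
    pvFileStepB modules (pvIndexB modules) (S, S) f
      = ((pvRoleSeq f modules).foldl PySem.Set.add S, (pvRoleSeq f modules).foldl PySem.Set.add S) := by
  show (PySem.List.sorted (pvHits f modules) (fun x => x)).foldl (fun st i =>
      let r := PySem.Dict.getD (PySem.Dict.mk (PySem.List.pyGetD modules i [])) "role" ""
      if PySem.Set.contains st.1 r then st else (PySem.Set.add st.1 r, st.2 ++ [r])) (S, S) = _
  rw [sorted_pvHits]
  have hmap : ((pvIdx f modules).foldl (fun st i =>
      let r := PySem.Dict.getD (PySem.Dict.mk (PySem.List.pyGetD modules i [])) "role" ""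
      if PySem.Set.contains st.1 r then st else (PySem.Set.add st.1 r, st.2 ++ [r])) ((S, S) : PySem.Set String × List String))
    = (((pvIdx f modules).map (fun i => pvRole (PySem.List.pyGetD modules i []))).foldl
        (fun st r => if PySem.Set.contains st.1 r then st else (PySem.Set.add st.1 r, st.2 ++ [r])) (S, S)) :=
    (List.foldl_map (f := fun i => pvRole (PySem.List.pyGetD modules i []))
      (g := fun (st : PySem.Set String × List String) r =>
        if PySem.Set.contains st.1 r then st else (PySem.Set.add st.1 r, st.2 ++ [r]))
      (l := pvIdx f modules) (init := (S, S))).symm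
  rw [hmap, pvIdx_map_role]
  exact pair_fold _ S

-- the whole file loop
lemma files_fold (files : List String) (modules : List (List (String × String))) (S : PySem.Set String) :
    files.foldl (pvFileStepB modules (pvIndexB modules)) (S, S)
      = (files.foldl (fun roles f => (pvRoleSeq f modules).foldl PySem.Set.add roles) S,
         files.foldl (fun roles f => (pvRoleSeq f modules).foldl PySem.Set.add roles) S) := by
  induction files generalizing S with
  | nil => rfl
  | cons f fs ih =>
    simp only [List.foldl_cons]
    rw [file_step]
    exact ih ((pvRoleSeq f modules).foldl PySem.Set.add S)

lemma pvRolesA_eq (files : List String) (modules : List (List (String × String))) :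
    pvRolesA files modules
      = files.foldl (fun roles f => (pvRoleSeq f modules).foldl PySem.Set.add roles) PySem.Set.empty := by
  unfold pvRolesA
  apply PySem.List.foldl_congr_mem
  intro acc x _
  exact pvRolesA_inner x modules acc

lemma nodup_foldl_add (rs : List String) (S : PySem.Set String) (h : S.Nodup) :
    (rs.foldl PySem.Set.add S).Nodup := by
  induction rs generalizing S with
  | nil => exact h
  | cons r rs ih => exact ih _ (PySem.Set.nodup_add S r h)

lemma nodup_outer (files : List String) (modules : List (List (String × String))) (S : PySem.Set String)
    (h : S.Nodup) :
    (files.foldl (fun roles f => (pvRoleSeq f modules).foldl PySem.Set.add roles) S).Nodup := by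
  induction files generalizing S with
  | nil => exact h
  | cons f fs ih => exact ih _ (nodup_foldl_add _ _ h)

lemma nodup_pvRolesA (files : List String) (modules : List (List (String × String))) :
    (pvRolesA files modules).Nodup := by
  rw [pvRolesA_eq]
  exact nodup_outer files modules PySem.Set.empty List.nodup_nil

-- ===== VERDICT (by name: the statement is the Claim_ definition above) =====
theorem resolve_expansion_scope_py_spec : Claim_equal_resolve_expansion_scope_py := by
  intro files modules policy _
  unfold Spec_resolve_expansion_scope_py
  have hst : files.foldl (pvFileStepB modules (pvIndexB modules)) (PySem.Set.empty, []) =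
      (pvRolesA files modules, pvRolesA files modules) := by
    rw [pvRolesA_eq]
    exact files_fold files modules PySem.Set.empty
  show [("allowed", (pvScopesA policy (pvRolesA files modules)).1),
        ("blocked", (pvScopesA policy (pvRolesA files modules)).2),
        ("roles", pvRolesA files modules)]
      = [("allowed", (pvScopesB policy (files.foldl (pvFileStepB modules (pvIndexB modules)) (PySem.Set.empty, [])).2).1),
         ("blocked", (pvScopesB policy (files.foldl (pvFileStepB modules (pvIndexB modules)) (PySem.Set.empty, [])).2).2),
         ("roles", PySem.Set.ofList (files.foldl (pvFileStepB modules (pvIndexB modules)) (PySem.Set.empty, [])).2)]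
  rw [hst]
  dsimp only
  rw [show pvScopesB = pvScopesA from rfl,
    PySem.Set.ofList_eq_self_of_nodup _ (nodup_pvRolesA files modules)]
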